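-- pv_equiv track=rewrite | github.com/guanrenyang/SJTU-Course-Notes | CS410-人工智能/Project 1/Dynamic_Programming.py | __pairwiseAlign
-- ===== SOURCE A (Python) =====
-- def __pairwiseAlign(x: str, y: str):
--
--     def forward(DP_table, i, j):
--         if i==0 and j==0:
--             return
--         elif i==0:
--             DP_table[i][j]=DP_table[i][j-1]+2
--         elif j==0:
--             DP_table[i][j]=DP_table[i-1][j]+2
--         else:
--             if x[i-1]==y[j-1]:
--                 DP_table[i][j]=min(DP_table[i-1][j-1], min(DP_table[i-1][j]+2, DP_table[i][j-1]+2)) # x_i and y_j match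
--             else:
--                 DP_table[i][j]=min(DP_table[i-1][j-1]+3, min(DP_table[i-1][j]+2, DP_table[i][j-1]+2)) # x_i and y_j mismatch
--
--     row = len(x)
--     col = len(y)
--
--     Cost = [[0 for j in range(col + 1)] for i in range(row + 1)] # create a table for DP
--
--     for i in range(0,row+1):
--         for j in range(0, col+1):
--             forward(Cost, i, j)
--     return Cost[row][col]
--     '''Baseline只考虑比较,暂时不考虑打印optimal solution'''
-- ===== SOURCE B (Python) =====
-- def __pairwiseAlign(x: str, y: str):
--     # Dual formulation: an alignment with k matches and s substitutions costs
--     # 2*(len(x)+len(y)) - (4*k + s), so the minimum cost equals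
--     # 2*(len(x)+len(y)) minus the MAXIMUM alignment score (4 per match, 1 per
--     # substitution, 0 per gap).  We maximise that score with a single in-place
--     # array updated over y, and convert by the closed formula at the end.
--     score = [0] * (len(x) + 1)
--     for yj in y:
--         diag = 0
--         for i, xi in enumerate(x, 1):
--             above = score[i]
--             score[i] = max(diag + (4 if yj == xi else 1), above, score[i - 1])
--             diag = above
--     return 2 * (len(x) + len(y)) - score[len(x)]
-- ===== Notes on version B (the rewrite author's own statement) =====
-- stated objective: alternative
-- what changed: B solves the dual problem: instead of filling A's full (row+1)x(col+1) min-cost table cell by cell via the mutating 'forward' helper, it maximises the alignment score (4 per match, 1 per substitution, 0 per gap) in a single in-place array scanned over y, and recovers the cost by the closed formula 2*(len(x)+len(y)) - score.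
import Mathlib
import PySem

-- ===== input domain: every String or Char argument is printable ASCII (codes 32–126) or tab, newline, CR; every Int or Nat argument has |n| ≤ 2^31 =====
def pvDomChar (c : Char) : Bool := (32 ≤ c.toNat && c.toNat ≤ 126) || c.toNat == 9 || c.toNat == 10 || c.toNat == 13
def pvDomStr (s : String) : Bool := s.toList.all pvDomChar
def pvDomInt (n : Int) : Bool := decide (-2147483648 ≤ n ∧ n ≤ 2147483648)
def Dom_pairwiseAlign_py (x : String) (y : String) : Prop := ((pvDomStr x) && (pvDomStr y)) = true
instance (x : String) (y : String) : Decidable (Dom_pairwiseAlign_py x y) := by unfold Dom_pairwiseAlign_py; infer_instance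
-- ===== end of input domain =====

-- B solves the DUAL problem: it maximises the alignment score (4 per match, 1 per
-- substitution, 0 per gap) in one in-place array over y and returns
-- 2*(len x + len y) - score; A fills the full min-cost table (A mutates only its local table).

-- ===== PORT A =====
-- table access t[i][j] / t[i][j] = v (indices produced by range(), always in range here)
def tblGet (t : List (List Int)) (i j : Int) : Int :=
  PySem.List.pyGetD (PySem.List.pyGetD t i []) j 0

def tblSet (t : List (List Int)) (i j : Int) (v : Int) : List (List Int) :=
  PySem.List.pySetD t i (PySem.List.pySetD (PySem.List.pyGetD t i []) j v)

-- the inner helper 'forward' (mutation rendered as returning the updated table)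
def forwardA (xs ys : List Char) (t : List (List Int)) (i j : Int) : List (List Int) :=
  if i = 0 ∧ j = 0 then t
  else if i = 0 then tblSet t i j (tblGet t i (j-1) + 2)
  else if j = 0 then tblSet t i j (tblGet t (i-1) j + 2)
  else if PySem.List.pyGetD xs (i-1) ' ' = PySem.List.pyGetD ys (j-1) ' ' then
    tblSet t i j (min (tblGet t (i-1) (j-1)) (min (tblGet t (i-1) j + 2) (tblGet t i (j-1) + 2)))
  else
    tblSet t i j (min (tblGet t (i-1) (j-1) + 3) (min (tblGet t (i-1) j + 2) (tblGet t i (j-1) + 2)))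

def pairwiseAlign_py (x : String) (y : String) : Int :=
  let xs := x.toList
  let ys := y.toList
  let row : Int := xs.length
  let col : Int := ys.length
  let cost : List (List Int) :=
    (PySem.List.pyRange 0 (row + 1) 1).map (fun _i =>
      (PySem.List.pyRange 0 (col + 1) 1).map (fun _j => (0 : Int)))
  let cost :=
    (PySem.List.pyRange 0 (row + 1) 1).foldl (fun t i =>
      (PySem.List.pyRange 0 (col + 1) 1).foldl (fun t j => forwardA xs ys t i j) t) cost
  tblGet cost row col

-- ===== PORT B =====
-- inner loop 'for i, xi in enumerate(x, 1): above = score[i]; score[i] = max(diag + v, above, score[i-1]); diag = above'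
-- (the in-place update of score[1:] is rendered as a lockstep recursion carrying left = score[i-1] (new) and diag = old score[i-1])
def goB (yj : Char) : Int → Int → List Int → List Char → List Int
  | _, _, s, [] => s
  | _, _, [], _ :: _ => []
  | left, diag, above :: rest, xi :: xs' =>
      let v := max (diag + (if yj = xi then 4 else 1)) (max above left)
      v :: goB yj v above rest xs'

-- one outer-loop iteration: score[0] is untouched, diag starts at 0
def rowB (yj : Char) (score : List Int) (xs : List Char) : List Int :=
  match score with
  | [] => []
  | s0 :: rest => s0 :: goB yj s0 0 rest xs

def pairwiseAlign_py_alt (x : String) (y : String) : Int :=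
  let xs := x.toList
  let score : List Int := List.replicate (xs.length + 1) 0
  let fin := y.toList.foldl (fun sc yj => rowB yj sc xs) score
  2 * ((xs.length : Int) + (y.toList.length : Int)) - PySem.List.pyGetD fin (xs.length : Int) 0

-- ===== PRECONDITION & SPEC =====
def Spec_pairwiseAlign_py (x : String) (y : String) (out : Int) : Prop := out = pairwiseAlign_py_alt x y
instance (x : String) (y : String) (out : Int) : Decidable (Spec_pairwiseAlign_py x y out) := by unfold Spec_pairwiseAlign_py; infer_instance

-- ===== CLAIM (what is proved, stated in full; the proofs are below) =====
def Claim_equal_pairwiseAlign_py : Prop := ∀ (x : String) (y : String), Dom_pairwiseAlign_py x y → Spec_pairwiseAlign_py x y (pairwiseAlign_py x y)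

-- ===== LEMMAS AND PROOFS =====

-- the min-cost cell recurrence A's table satisfies
def dA (xs ys : List Char) : Nat → Nat → Int
  | 0, j => 2 * j
  | (i+1), 0 => 2 * (i + 1)
  | (i+1), (j+1) =>
      min (dA xs ys i j + (if xs.getD i ' ' = ys.getD j ' ' then 0 else 3))
          (min (dA xs ys i (j+1) + 2) (dA xs ys (i+1) j + 2))

-- the max-score cell recurrence B's array satisfies (rows indexed by y, columns by x)
def sB (ys xs : List Char) : Nat → Nat → Int
  | 0, _ => 0
  | (_+1), 0 => 0
  | (j+1), (i+1) =>
      max (sB ys xs j i + (if ys.getD j ' ' = xs.getD i ' ' then 4 else 1))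
          (max (sB ys xs j (i+1)) (sB ys xs (j+1) i))

theorem dA_zero_right (xs ys : List Char) (i : Nat) : dA xs ys i 0 = 2 * i := by
  cases i <;> simp [dA]

theorem sB_zero_right (ys xs : List Char) (j : Nat) : sB ys xs j 0 = 0 := by
  cases j <;> simp [sB]

-- DUALITY: min cost = 2*(i+j) - max score
theorem dual_bounded (xs ys : List Char) :
    ∀ n i j, i + j ≤ n → dA xs ys i j = 2 * ((i : Int) + j) - sB ys xs j i := by
  intro n
  induction n with
  | zero =>
    intro i j h
    have hi : i = 0 := by omega
    have hj : j = 0 := by omega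
    subst hi; subst hj; simp [dA, sB]
  | succ n ih =>
    intro i j h
    cases i with
    | zero => simp [dA, sB_zero_right]
    | succ i' =>
      cases j with
      | zero => simp [dA, sB]
      | succ j' =>
        have h1 := ih i' j' (by omega)
        have h2 := ih i' (j'+1) (by omega)
        have h3 := ih (i'+1) j' (by omega)
        simp only [dA, sB, h1, h2, h3]
        by_cases hc : xs.getD i' ' ' = ys.getD j' ' '
        · rw [if_pos hc, if_pos hc.symm]
          push_cast
          simp only [min_def, max_def]
          split_ifs <;> omega
        · rw [if_neg hc, if_neg (fun h' => hc h'.symm)]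
          push_cast
          simp only [min_def, max_def]
          split_ifs <;> omega

theorem dual (xs ys : List Char) (i j : Nat) :
    dA xs ys i j = 2 * ((i : Int) + j) - sB ys xs j i :=
  dual_bounded xs ys (i + j) i j le_rfl

-- generic list-as-table-row helpers
theorem getD_map_range (f : Nat → Int) (n k : Nat) (h : k < n) :
    ((List.range n).map f).getD k 0 = f k := by
  rw [List.getD_eq_getElem _ _ (by simpa using h)]
  simp

theorem eq_map_range_of_getD (l : List Int) (f : Nat → Int) (n : Nat)
    (hl : l.length = n) (h : ∀ k, k < n → l.getD k 0 = f k) :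
    l = (List.range n).map f := by
  apply List.ext_getElem (by simp [hl])
  intro k h1 h2
  have hk := h k (by omega)
  rw [List.getD_eq_getElem _ _ h1] at hk
  simpa using hk

-- ===== A-side: the table fill equals the fold of a row transformer nextRow =====

theorem getD_append_cons {α : Type} (pre : List α) (r : α) (rest : List α) (d : α) :
    (pre ++ r :: rest).getD pre.length d = r := by
  simp [List.getD]

theorem set_append_cons {α : Type} (pre : List α) (r : α) (rest : List α) (v : α) :
    (pre ++ r :: rest).set pre.length v = pre ++ v :: rest := by
  rw [List.set_append_right _ _ (le_refl _)]; simp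

-- the row recurrence, as a pure list function (proof device for A's mutation)
def rowStep (xi : Char) : Int → List Int → List Char → List Int
  | left, d :: up :: rest, yj :: ys =>
      let v := min (d + (if xi = yj then 0 else 3)) (min (up + 2) (left + 2))
      v :: rowStep xi v (up :: rest) ys
  | _, _, _ => []

def nextRow (xi : Char) (prev : List Int) (ys : List Char) : List Int :=
  match prev with
  | [] => []
  | p0 :: _ => (p0 + 2) :: rowStep xi (p0 + 2) prev ys

theorem rowStep_length (xi : Char) : ∀ (ys : List Char) (prev : List Int) (left : Int),
    (rowStep xi left prev ys).length = min (prev.length - 1) ys.length := by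
  intro ys
  induction ys with
  | nil => intro prev left; cases prev with
    | nil => simp [rowStep]
    | cons d t => cases t <;> simp [rowStep]
  | cons yj ys ih =>
    intro prev left
    cases prev with
    | nil => simp [rowStep]
    | cons d t => cases t with
      | nil => simp [rowStep]
      | cons up rest => simp only [rowStep, List.length_cons, ih]; omega

theorem nextRow_length (xi : Char) (prev : List Int) (ys : List Char)
    (h : prev.length = ys.length + 1) : (nextRow xi prev ys).length = ys.length + 1 := by
  cases prev with
  | nil => simp at h
  | cons p0 t => simp [nextRow, rowStep_length]; simp at h; omega

theorem nextRow_zero (xi : Char) (prev : List Int) (ys : List Char) (h : prev ≠ []) :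
    (nextRow xi prev ys).getD 0 0 = prev.getD 0 0 + 2 := by
  cases prev with
  | nil => exact absurd rfl h
  | cons p0 t => simp [nextRow]

theorem rowStep_get (xi : Char) : ∀ (k : Nat) (ys : List Char) (prev : List Int) (left : Int),
    k + 1 < prev.length → k < ys.length →
    (rowStep xi left prev ys).getD k 0 =
      min (prev.getD k 0 + (if xi = ys.getD k ' ' then 0 else 3))
          (min (prev.getD (k+1) 0 + 2)
               ((if k = 0 then left else (rowStep xi left prev ys).getD (k-1) 0) + 2)) := by
  intro k
  induction k with
  | zero =>
    intro ys prev left hp hy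
    match prev, ys with
    | d :: up :: rest, yj :: ys' => simp [rowStep]
  | succ k ih =>
    intro ys prev left hp hy
    match prev, ys with
    | d :: up :: rest, yj :: ys' =>
      simp only [rowStep]
      have hp' : k + 1 < (up :: rest).length := by simp at hp ⊢; omega
      have hy' : k < ys'.length := by simp at hy; omega
      rw [List.getD_cons_succ, ih ys' (up :: rest) _ hp' hy']
      cases k with
      | zero => simp
      | succ m => simp

theorem nextRow_get_succ (xi : Char) (prev : List Int) (ys : List Char) (k : Nat)
    (hp : k + 2 ≤ prev.length) (hy : k + 1 ≤ ys.length) :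
    (nextRow xi prev ys).getD (k+1) 0 =
      min (prev.getD k 0 + (if xi = ys.getD k ' ' then 0 else 3))
          (min (prev.getD (k+1) 0 + 2) ((nextRow xi prev ys).getD k 0 + 2)) := by
  cases prev with
  | nil => simp at hp
  | cons p0 t =>
    show (rowStep xi (p0+2) (p0 :: t) ys).getD k 0 = _
    rw [rowStep_get xi k ys (p0 :: t) (p0+2) (by simpa using hp) (by omega)]
    cases k with
    | zero => simp [nextRow]
    | succ m => simp [nextRow]

theorem getD_append_cons2 {α : Type} (pre : List α) (r1 r2 : α) (rest : List α) (d : α) :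
    (pre ++ r1 :: r2 :: rest).getD (pre.length + 1) d = r2 := by
  have h := getD_append_cons (pre ++ [r1]) r2 rest d
  simpa using h

theorem set_append_cons2 {α : Type} (pre : List α) (r1 r2 : α) (rest : List α) (v : α) :
    (pre ++ r1 :: r2 :: rest).set (pre.length + 1) v = pre ++ r1 :: v :: rest := by
  have h := set_append_cons (pre ++ [r1]) r2 rest v
  simpa using h

theorem set_take_drop (l z : List Int) (a : Nat) (ha : a < l.length) (hz : a < z.length) :
    (l.take a ++ z.drop a).set a (l.getD a 0) = l.take (a+1) ++ z.drop (a+1) := by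
  rw [List.set_append_right _ _ (by simp)]
  have h1 : a - (l.take a).length = 0 := by simp; omega
  rw [h1, List.drop_eq_getElem_cons hz, List.set_cons_zero]
  rw [List.getD_eq_getElem l 0 ha, List.take_succ_eq_append_getElem ha,
      List.append_assoc, List.singleton_append]

theorem getD_take_append_drop (l z : List Int) (a k : Nat) (hk : k < a) (ha : a ≤ l.length) (d : Int) :
    (l.take a ++ z.drop a).getD k d = l.getD k d := by
  rw [List.getD_append _ _ _ _ (by simp; omega)]
  simp [List.getD]; rw [List.getElem?_take_of_lt hk]

-- A's inner loop over one row, as a named fold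
def innerFold (xs ys : List Char) (i : Int) (t : List (List Int)) : List (List Int) :=
  (PySem.List.pyRange 0 ((ys.length : Int) + 1) 1).foldl (fun t j => forwardA xs ys t i j) t

theorem forwardA_step (xs ys : List Char) (pre : List (List Int)) (prev z : List Int) (rest : List (List Int))
    (a : Nat) (hprev : prev.length = ys.length + 1) (hz : z.length = ys.length + 1)
    (h1 : 1 ≤ a) (h2 : a ≤ ys.length) :
    forwardA xs ys
      (pre ++ prev :: ((nextRow (xs.getD pre.length ' ') prev ys).take a ++ z.drop a) :: rest)
      ((pre.length : Int) + 1) (a : Int)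
    = pre ++ prev :: ((nextRow (xs.getD pre.length ' ') prev ys).take (a+1) ++ z.drop (a+1)) :: rest := by
  set xi := xs.getD pre.length ' ' with hxi
  set target := nextRow xi prev ys with htgt
  have hLt : target.length = ys.length + 1 := nextRow_length _ _ _ hprev
  have e2 : ((a : Int)) - 1 = ((a - 1 : Nat) : Int) := by omega
  have e3 : ((pre.length : Int) + 1) = ((pre.length + 1 : Nat) : Int) := by push_cast; ring
  have e1 : (((pre.length + 1 : Nat) : Int)) - 1 = ((pre.length : Nat) : Int) := by push_cast; ring
  have hrec := nextRow_get_succ xi prev ys (a - 1) (by omega) (by omega)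
  have ha1 : a - 1 + 1 = a := by omega
  rw [ha1] at hrec
  rw [← htgt] at hrec
  simp only [forwardA, e3, e1, e2, tblGet, tblSet,
    PySem.List.pyGetD_natCast, PySem.List.pySetD_natCast]
  rw [if_neg (by omega), if_neg (by omega), if_neg (by omega)]
  rw [getD_append_cons, getD_append_cons2, set_append_cons2, ← hxi]
  rw [getD_take_append_drop target z a (a-1) (by omega) (by omega)]
  have hset := set_take_drop target z a (by omega) (by omega)
  by_cases hc : xi = ys.getD (a - 1) ' '
  · rw [if_pos hc]
    rw [if_pos hc] at hrec
    have : min (prev.getD (a-1) 0) (min (prev.getD a 0 + 2) (target.getD (a-1) 0 + 2))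
        = target.getD a 0 := by rw [hrec]; ring_nf
    rw [this, hset]
  · rw [if_neg hc]
    rw [if_neg hc] at hrec
    rw [show min (prev.getD (a-1) 0 + 3) (min (prev.getD a 0 + 2) (target.getD (a-1) 0 + 2))
        = target.getD a 0 from hrec.symm, hset]
    exact set_append_cons2 pre prev _ rest _

theorem inner_go (xs ys : List Char) (pre : List (List Int)) (prev z : List Int) (rest : List (List Int))
    (hprev : prev.length = ys.length + 1) (hz : z.length = ys.length + 1) :
    ∀ (r a : Nat), a + r = ys.length + 1 → 1 ≤ a →
    (PySem.List.pyRange (a : Int) ((ys.length : Int) + 1) 1).foldl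
        (fun t j => forwardA xs ys t ((pre.length : Int) + 1) j)
        (pre ++ prev :: ((nextRow (xs.getD pre.length ' ') prev ys).take a ++ z.drop a) :: rest)
    = pre ++ prev :: nextRow (xs.getD pre.length ' ') prev ys :: rest := by
  intro r
  induction r with
  | zero =>
    intro a ha _
    have hLt := nextRow_length (xs.getD pre.length ' ') prev ys hprev
    rw [PySem.List.pyRange_one_eq_nil (by push_cast; omega)]
    simp only [List.foldl_nil]
    rw [List.take_of_length_le (by omega), List.drop_of_length_le (by omega)]
    simp
  | succ r ih =>
    intro a ha h1
    rw [PySem.List.pyRange_one_cons (by push_cast; omega), List.foldl_cons]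
    rw [forwardA_step xs ys pre prev z rest a hprev hz h1 (by omega)]
    rw [show ((a : Int) + 1) = ((a + 1 : Nat) : Int) by push_cast; ring]
    exact ih (a+1) (by omega) (by omega)

theorem inner_row (xs ys : List Char) (pre : List (List Int)) (prev z : List Int) (rest : List (List Int))
    (hprev : prev.length = ys.length + 1) (hz : z.length = ys.length + 1) :
    innerFold xs ys ((pre.length : Int) + 1) (pre ++ prev :: z :: rest)
    = pre ++ prev :: nextRow (xs.getD pre.length ' ') prev ys :: rest := by
  set xi := xs.getD pre.length ' ' with hxi
  set target := nextRow xi prev ys with htgt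
  have hLt : target.length = ys.length + 1 := nextRow_length _ _ _ hprev
  unfold innerFold
  rw [PySem.List.pyRange_one_cons (by push_cast; omega), List.foldl_cons]
  have hstep0 : forwardA xs ys (pre ++ prev :: z :: rest) ((pre.length : Int) + 1) 0
      = pre ++ prev :: (target.take 1 ++ z.drop 1) :: rest := by
    have e3 : ((pre.length : Int) + 1) = ((pre.length + 1 : Nat) : Int) := by push_cast; ring
    have e1 : (((pre.length + 1 : Nat) : Int)) - 1 = ((pre.length : Nat) : Int) := by push_cast; ring
    simp only [forwardA, e3, e1, tblGet, tblSet,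
      PySem.List.pyGetD_natCast, PySem.List.pySetD_natCast]
    rw [if_neg (by omega), if_neg (by omega), if_pos trivial]
    rw [getD_append_cons, getD_append_cons2]
    simp only [PySem.List.pyGetD_zero]
    have h0 : target.getD 0 0 = prev.getD 0 0 + 2 := nextRow_zero xi prev ys (by
      intro hnil; rw [hnil] at hprev; simp at hprev)
    have htne : target ≠ [] := by intro h; rw [h] at hLt; simp at hLt
    have hzne : z ≠ [] := by intro h; rw [h] at hz; simp at hz
    obtain ⟨t0, ts, ht⟩ := List.exists_cons_of_ne_nil htne
    obtain ⟨z0, zs, hzc⟩ := List.exists_cons_of_ne_nil hzne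
    rw [ht] at h0
    simp only [List.getD_cons_zero] at h0
    rw [ht, hzc]
    rw [show PySem.List.pySetD (z0 :: zs) (0:Int) (prev.getD 0 0 + 2) = (prev.getD 0 0 + 2) :: zs
        from by simp [PySem.List.pySetD_of_nonneg]]
    rw [show (t0::ts).take 1 ++ (z0::zs).drop 1 = t0 :: zs by simp, h0]
    exact set_append_cons2 pre prev _ rest _
  rw [hstep0, show ((0 : Int) + 1) = ((1 : Nat) : Int) by norm_num]
  exact inner_go xs ys pre prev z rest hprev hz ys.length 1 (by omega) (by omega)

-- A's initial row after row 0 of the fill: [2*j for j in range(col+1)]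
def initRow (ys : List Char) : List Int :=
  (PySem.List.pyRange 0 ((ys.length : Int) + 1) 1).map (fun j => 2 * j)

theorem initRow_length (ys : List Char) : (initRow ys).length = ys.length + 1 := by
  simp [initRow, PySem.List.length_pyRange_one]

theorem initRow_get (ys : List Char) (a : Nat) (ha : a ≤ ys.length) :
    (initRow ys).getD a 0 = 2 * (a : Int) := by
  rw [← PySem.List.pyGetD_natCast]
  unfold initRow
  rw [show ((ys.length : Int) + 1) = ((ys.length + 1 : Nat) : Int) by push_cast; ring]
  rw [PySem.List.pyGetD_map_pyRange _ _ _ _ (by omega)]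

theorem row0_go (xs ys : List Char) (z : List Int) (rest : List (List Int))
    (hz : z.length = ys.length + 1) :
    ∀ (r a : Nat), a + r = ys.length + 1 → 1 ≤ a →
    (PySem.List.pyRange (a : Int) ((ys.length : Int) + 1) 1).foldl
        (fun t j => forwardA xs ys t 0 j)
        (((initRow ys).take a ++ z.drop a) :: rest)
    = initRow ys :: rest := by
  intro r
  induction r with
  | zero =>
    intro a ha _
    have hLt := initRow_length ys
    rw [PySem.List.pyRange_one_eq_nil (by push_cast; omega)]
    simp only [List.foldl_nil]
    rw [List.take_of_length_le (by omega), List.drop_of_length_le (by omega)]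
    simp
  | succ r ih =>
    intro a ha h1
    rw [PySem.List.pyRange_one_cons (by push_cast; omega), List.foldl_cons]
    have hstep : forwardA xs ys (((initRow ys).take a ++ z.drop a) :: rest) 0 (a : Int)
        = ((initRow ys).take (a+1) ++ z.drop (a+1)) :: rest := by
      have e2 : ((a : Int)) - 1 = ((a - 1 : Nat) : Int) := by omega
      simp only [forwardA, e2, tblGet, tblSet,
        PySem.List.pyGetD_natCast, PySem.List.pySetD_natCast]
      rw [if_neg (by omega), if_pos trivial]
      simp only [PySem.List.pyGetD_zero, List.getD_cons_zero]
      rw [show ∀ v : List Int, ∀ rest' : List (List Int), ∀ c : List Int,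
            PySem.List.pySetD (c :: rest') (0:Int) v = v :: rest'
          from fun v rest' c => by simp [PySem.List.pySetD_of_nonneg]]
      rw [getD_take_append_drop _ z a (a-1) (by omega) (by rw [initRow_length]; omega)]
      rw [initRow_get ys (a-1) (by omega)]
      have hv : 2 * ((a - 1 : Nat) : Int) + 2 = (initRow ys).getD a 0 := by
        rw [initRow_get ys a (by omega)]; push_cast [Nat.cast_sub h1]; ring
      rw [hv, set_take_drop _ z a (by rw [initRow_length]; omega) (by omega)]
    rw [hstep, show ((a : Int) + 1) = ((a + 1 : Nat) : Int) by push_cast; ring]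
    exact ih (a+1) (by omega) (by omega)

theorem row0 (xs ys : List Char) (rest : List (List Int)) :
    innerFold xs ys 0 (List.replicate (ys.length + 1) 0 :: rest) = initRow ys :: rest := by
  unfold innerFold
  rw [PySem.List.pyRange_one_cons (by push_cast; omega), List.foldl_cons]
  have h00 : forwardA xs ys (List.replicate (ys.length + 1) 0 :: rest) 0 0
      = List.replicate (ys.length + 1) 0 :: rest := by
    simp [forwardA]
  rw [h00]
  have hz : (List.replicate (ys.length + 1) (0:Int)).length = ys.length + 1 := by simp
  have hhead : List.replicate (ys.length + 1) (0:Int)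
      = (initRow ys).take 1 ++ (List.replicate (ys.length + 1) (0:Int)).drop 1 := by
    have h0 : (initRow ys).getD 0 0 = 0 := by simpa using initRow_get ys 0 (by omega)
    match h : initRow ys, initRow_length ys with
    | t0 :: ts, _ =>
      rw [h] at h0
      simp only [List.getD_cons_zero] at h0
      simp [List.replicate_succ, h0]
  rw [show ((0 : Int) + 1) = ((1 : Nat) : Int) by norm_num]
  calc (PySem.List.pyRange ((1:Nat) : Int) ((ys.length : Int) + 1) 1).foldl
          (fun t j => forwardA xs ys t 0 j) (List.replicate (ys.length + 1) 0 :: rest)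
      = (PySem.List.pyRange ((1:Nat) : Int) ((ys.length : Int) + 1) 1).foldl
          (fun t j => forwardA xs ys t 0 j)
          (((initRow ys).take 1 ++ (List.replicate (ys.length + 1) (0:Int)).drop 1) :: rest) := by
        rw [← hhead]
    _ = initRow ys :: rest :=
        row0_go xs ys (List.replicate (ys.length + 1) 0) rest
          (by simp) ys.length 1 (by omega) (by omega)

-- the sequence of rows A fills in, driven by nextRow
def rowsScan (ys : List Char) : List Char → List Int → List (List Int)
  | [], prev => [prev]
  | c :: cs, prev => prev :: rowsScan ys cs (nextRow c prev ys)

theorem outer_go (ys : List Char) :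
    ∀ (sfx csmd : List Char) (pre : List (List Int)) (prev : List Int),
    pre.length = csmd.length → prev.length = ys.length + 1 →
    (PySem.List.pyRange ((pre.length : Int) + 1) ((pre.length : Int) + 1 + (sfx.length : Int)) 1).foldl
        (fun t i => innerFold (csmd ++ sfx) ys i t)
        (pre ++ prev :: List.replicate sfx.length (List.replicate (ys.length + 1) 0))
    = pre ++ rowsScan ys sfx prev := by
  intro sfx
  induction sfx with
  | nil =>
    intro csmd pre prev _ _
    rw [PySem.List.pyRange_one_eq_nil (by simp)]
    simp [rowsScan]
  | cons c cs ih =>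
    intro csmd pre prev hlen hprev
    simp only [List.length_cons]
    rw [PySem.List.pyRange_one_cons (by push_cast; omega), List.foldl_cons]
    rw [List.replicate_succ]
    rw [inner_row (csmd ++ c :: cs) ys pre prev (List.replicate (ys.length + 1) 0) _ hprev (by simp)]
    rw [show (csmd ++ c :: cs).getD pre.length ' ' = c by rw [hlen]; exact getD_append_cons csmd c cs ' ']
    have heq : pre ++ prev :: nextRow c prev ys :: List.replicate cs.length (List.replicate (ys.length + 1) 0)
        = (pre ++ [prev]) ++ nextRow c prev ys :: List.replicate cs.length (List.replicate (ys.length + 1) 0) := by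
      simp
    rw [heq]
    have hx : csmd ++ c :: cs = (csmd ++ [c]) ++ cs := by simp
    have e1 : ((pre.length : Int) + 1) + 1 = (((pre ++ [prev]).length : Int) + 1) := by simp
    have e2 : ((pre.length : Int) + 1 + ((cs.length : Nat) + 1 : Nat)) = (((pre ++ [prev]).length : Int) + 1 + (cs.length : Int)) := by
      simp; push_cast; ring
    rw [hx, e1, e2, ih (csmd ++ [c]) (pre ++ [prev]) (nextRow c prev ys)
      (by simp [hlen]) (nextRow_length _ _ _ hprev)]
    simp [rowsScan]

theorem rowsScan_getD_last (ys : List Char) :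
    ∀ (cs : List Char) (prev : List Int),
    (rowsScan ys cs prev).getD cs.length [] = cs.foldl (fun p c => nextRow c p ys) prev := by
  intro cs
  induction cs with
  | nil => intro prev; simp [rowsScan]
  | cons c cs ih => intro prev; simp only [rowsScan, List.length_cons, List.getD_cons_succ,
      List.foldl_cons]; exact ih (nextRow c prev ys)

theorem map_const_pyRange {α : Type} (n : Nat) (c : α) :
    (PySem.List.pyRange 0 ((n : Int)) 1).map (fun _ => c) = List.replicate n c := by
  refine List.eq_replicate_iff.mpr ⟨?_, ?_⟩
  · simp [PySem.List.length_pyRange_one]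
  · intro b hb
    simp at hb
    exact hb.2

-- each nextRow step maps the dA row i to the dA row i+1
theorem nextRow_map_d (xs ys : List Char) (i : Nat) :
    nextRow (xs.getD i ' ') ((List.range (ys.length + 1)).map (fun j => dA xs ys i j)) ys
      = (List.range (ys.length + 1)).map (fun j => dA xs ys (i+1) j) := by
  set prev := (List.range (ys.length + 1)).map (fun j => dA xs ys i j) with hprev
  have hl : prev.length = ys.length + 1 := by simp [hprev]
  apply eq_map_range_of_getD _ _ _ (nextRow_length _ _ _ hl)
  have aux : ∀ k, k ≤ ys.length →
      (nextRow (xs.getD i ' ') prev ys).getD k 0 = dA xs ys (i+1) k := by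
    intro k
    induction k with
    | zero =>
      intro _
      rw [nextRow_zero _ _ _ (by intro h; rw [h] at hl; simp at hl)]
      rw [hprev, getD_map_range _ _ _ (by omega), dA_zero_right]
      rw [show dA xs ys (i+1) 0 = 2 * ((i : Int) + 1) from dA_zero_right xs ys (i+1) ▸ by push_cast; ring]
      ring
    | succ k ih =>
      intro hk
      rw [nextRow_get_succ _ _ _ _ (by omega) (by omega)]
      rw [ih (by omega)]
      rw [hprev, getD_map_range _ _ _ (by omega), getD_map_range _ _ _ (by omega)]
      simp [dA]
  intro k hk
  exact aux k (by omega)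

theorem fold_nextRow_d (xs ys : List Char) :
    ∀ i, i ≤ xs.length →
    ((xs.take i).foldl (fun p c => nextRow c p ys) (initRow ys))
      = (List.range (ys.length + 1)).map (fun j => dA xs ys i j) := by
  intro i
  induction i with
  | zero =>
    intro _
    simp only [List.take_zero, List.foldl_nil]
    apply eq_map_range_of_getD _ _ _ (initRow_length ys)
    intro k hk
    rw [initRow_get ys k (by omega)]
    simp [dA]
  | succ i ih =>
    intro hi
    have hlt : i < xs.length := by omega
    rw [List.take_succ_eq_append_getElem hlt, List.foldl_append, List.foldl_cons, List.foldl_nil]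
    rw [ih (by omega)]
    rw [show xs[i] = xs.getD i ' ' from (List.getD_eq_getElem xs ' ' hlt).symm]
    exact nextRow_map_d xs ys i

-- A's result is the corner of the dA recurrence
theorem A_eq_d (x y : String) :
    pairwiseAlign_py x y = dA x.toList y.toList x.toList.length y.toList.length := by
  unfold pairwiseAlign_py
  set xs := x.toList
  set ys := y.toList
  have hzt : (PySem.List.pyRange 0 ((xs.length : Int) + 1) 1).map (fun _ =>
        (PySem.List.pyRange 0 ((ys.length : Int) + 1) 1).map (fun _ => (0:Int)))
      = List.replicate (xs.length + 1) (List.replicate (ys.length + 1) (0:Int)) := by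
    rw [show ((ys.length : Int) + 1) = ((ys.length + 1 : Nat) : Int) by push_cast; ring,
        show ((xs.length : Int) + 1) = ((xs.length + 1 : Nat) : Int) by push_cast; ring,
        map_const_pyRange, map_const_pyRange]
  simp only [hzt]
  rw [show (PySem.List.pyRange 0 ((xs.length : Int) + 1) 1)
      = 0 :: PySem.List.pyRange 1 ((xs.length : Int) + 1) 1 from
      PySem.List.pyRange_one_cons (by push_cast; omega), List.foldl_cons]
  rw [List.replicate_succ]
  have hrow0 := row0 xs ys (List.replicate xs.length (List.replicate (ys.length + 1) 0))
  rw [show (PySem.List.pyRange 0 ((ys.length : Int) + 1) 1).foldl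
        (fun t j => forwardA xs ys t 0 j)
        (List.replicate (ys.length + 1) 0 :: List.replicate xs.length (List.replicate (ys.length + 1) 0))
      = initRow ys :: List.replicate xs.length (List.replicate (ys.length + 1) 0) from hrow0]
  have houter := outer_go ys xs [] [] (initRow ys) rfl (initRow_length ys)
  simp only [List.nil_append, List.length_nil, Nat.cast_zero, zero_add] at houter
  rw [show ((1:Int) + (xs.length : Int)) = ((xs.length : Int) + 1) from by ring] at houter
  unfold innerFold at houter
  rw [houter]
  have hlast : (rowsScan ys xs (initRow ys)).getD xs.length []
      = xs.foldl (fun p c => nextRow c p ys) (initRow ys) := rowsScan_getD_last ys xs (initRow ys)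
  simp only [tblGet, PySem.List.pyGetD_natCast, hlast]
  have hfold := fold_nextRow_d xs ys xs.length le_rfl
  rw [List.take_length] at hfold
  rw [hfold, getD_map_range _ _ _ (by omega)]

-- ===== B-side: the in-place score array equals the sB recurrence =====

theorem goB_length (yj : Char) : ∀ (xs : List Char) (rest : List Int) (left diag : Int),
    rest.length = xs.length → (goB yj left diag rest xs).length = rest.length := by
  intro xs
  induction xs with
  | nil => intro rest left diag _; simp [goB]
  | cons xi xs' ih =>
    intro rest left diag h
    cases rest with
    | nil => simp at h
    | cons above rest' =>
      simp only [goB, List.length_cons]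
      rw [ih rest' _ above (by simpa using h)]

theorem goB_get (yj : Char) : ∀ (k : Nat) (xs : List Char) (rest : List Int) (left diag : Int),
    k < rest.length → k < xs.length →
    (goB yj left diag rest xs).getD k 0 =
      max ((if k = 0 then diag else rest.getD (k-1) 0) + (if yj = xs.getD k ' ' then 4 else 1))
          (max (rest.getD k 0)
               (if k = 0 then left else (goB yj left diag rest xs).getD (k-1) 0)) := by
  intro k
  induction k with
  | zero =>
    intro xs rest left diag hr hx
    match rest, xs with
    | above :: rest', xi :: xs' => simp [goB]
  | succ k ih =>
    intro xs rest left diag hr hx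
    match rest, xs with
    | above :: rest', xi :: xs' =>
      simp only [goB]
      have hr' : k < rest'.length := by simp at hr; omega
      have hx' : k < xs'.length := by simp at hx; omega
      rw [List.getD_cons_succ, ih xs' rest' _ above hr' hx']
      cases k with
      | zero => simp
      | succ m => simp

-- each rowB step maps the sB row j to the sB row j+1
theorem rowB_map_s (ys xs : List Char) (j : Nat) :
    rowB (ys.getD j ' ') ((List.range (xs.length + 1)).map (fun i => sB ys xs j i)) xs
      = (List.range (xs.length + 1)).map (fun i => sB ys xs (j+1) i) := by
  set score := (List.range (xs.length + 1)).map (fun i => sB ys xs j i) with hscore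
  have hl : score.length = xs.length + 1 := by simp [hscore]
  obtain ⟨s0, rest, hsc⟩ : ∃ s0 rest, score = s0 :: rest := by
    cases h : score with
    | nil => rw [h] at hl; simp at hl
    | cons a b => exact ⟨a, b, rfl⟩
  have hs0 : s0 = 0 := by
    have := getD_map_range (fun i => sB ys xs j i) (xs.length + 1) 0 (by omega)
    rw [← hscore] at this; rw [hsc] at this
    simp only [List.getD_cons_zero] at this
    rw [this, sB_zero_right]
  have hrest : rest.length = xs.length := by rw [hsc] at hl; simpa using hl
  have hrowlen : (rowB (ys.getD j ' ') score xs).length = xs.length + 1 := by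
    rw [hsc]; simp only [rowB, List.length_cons]
    rw [goB_length _ _ _ _ _ (by omega)]; omega
  apply eq_map_range_of_getD _ _ _ hrowlen
  have aux : ∀ k, k ≤ xs.length →
      (rowB (ys.getD j ' ') score xs).getD k 0 = sB ys xs (j+1) k := by
    intro k
    induction k with
    | zero =>
      intro _
      rw [hsc]; simp only [rowB, List.getD_cons_zero]
      rw [hs0, sB_zero_right]
    | succ k ih =>
      intro hk
      have hrec : (rowB (ys.getD j ' ') score xs).getD (k+1) 0
          = (goB (ys.getD j ' ') s0 0 rest xs).getD k 0 := by
        rw [hsc]; simp [rowB]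
      rw [hrec, goB_get _ _ _ _ _ _ (by omega) (by omega)]
      have hscoreD : ∀ m, m ≤ xs.length → score.getD m 0 = sB ys xs j m := by
        intro m hm
        rw [hscore, getD_map_range _ _ _ (by omega)]
      -- rewrite the three references
      have hdiag : (if k = 0 then (0:Int) else rest.getD (k-1) 0) = sB ys xs j k := by
        cases k with
        | zero => simp [(sB_zero_right ys xs j).symm]
        | succ m =>
          have := hscoreD (m+1) (by omega)
          rw [hsc] at this; simpa using this
      have hup : rest.getD k 0 = sB ys xs j (k+1) := by
        have := hscoreD (k+1) (by omega)
        rw [hsc] at this; simpa using this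
      have hleft : (if k = 0 then s0 else (goB (ys.getD j ' ') s0 0 rest xs).getD (k-1) 0)
          = sB ys xs (j+1) k := by
        cases k with
        | zero => rw [if_pos rfl, hs0, sB_zero_right]
        | succ m =>
          rw [if_neg (by omega)]
          have h2 : (goB (ys.getD j ' ') s0 0 rest xs).getD (m + 1 - 1) 0
              = (rowB (ys.getD j ' ') score xs).getD (m+1) 0 := by
            rw [hsc]; simp [rowB]
          rw [h2]
          exact ih (by omega)
      rw [hdiag, hup, hleft]
      simp [sB]
  intro k hk
  exact aux k (by omega)

theorem fold_rowB_s (ys xs : List Char) :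
    ∀ j, j ≤ ys.length →
    ((ys.take j).foldl (fun sc yj => rowB yj sc xs) (List.replicate (xs.length + 1) 0))
      = (List.range (xs.length + 1)).map (fun i => sB ys xs j i) := by
  intro j
  induction j with
  | zero =>
    intro _
    simp only [List.take_zero, List.foldl_nil]
    apply eq_map_range_of_getD _ _ _ (by simp)
    intro k hk
    rw [List.getD_eq_getElem _ _ (by simpa using hk)]
    simp [sB]
  | succ j ih =>
    intro hj
    have hlt : j < ys.length := by omega
    rw [List.take_succ_eq_append_getElem hlt, List.foldl_append, List.foldl_cons, List.foldl_nil]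
    rw [ih (by omega)]
    rw [show ys[j] = ys.getD j ' ' from (List.getD_eq_getElem ys ' ' hlt).symm]
    exact rowB_map_s ys xs j

theorem B_eq_s (x y : String) :
    pairwiseAlign_py_alt x y
      = 2 * ((x.toList.length : Int) + y.toList.length)
        - sB y.toList x.toList y.toList.length x.toList.length := by
  simp only [pairwiseAlign_py_alt]
  have hfold := fold_rowB_s y.toList x.toList y.toList.length le_rfl
  rw [List.take_length] at hfold
  rw [hfold, PySem.List.pyGetD_natCast, getD_map_range _ _ _ (by omega)]

theorem pairwiseAlign_equal (x y : String) : pairwiseAlign_py x y = pairwiseAlign_py_alt x y := by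
  rw [A_eq_d, B_eq_s, dual]

-- ===== VERDICT (by name: the statement is the Claim_ definition above) =====
theorem pairwiseAlign_py_spec : Claim_equal_pairwiseAlign_py := by
  intro x y _
  unfold Spec_pairwiseAlign_py
  exact pairwiseAlign_equal x y
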